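-- pv_equiv track=rewrite | github.com/magnet5258/Algorithm | 백준/Silver/10728. XOR삼형제 1/XOR삼형제 1.py | solve
-- ===== SOURCE A (Python) =====
-- from itertools import combinations
--
-- def is_valid(seq):
--     for a, b, c in combinations(seq, 3):
--         if a ^ b ^ c == 0:
--             return False
--     return True
--
-- def solve(n):
--     result = []
--     all_nums = list(range(1, n + 1))
--     for bits in range(1, 1 << n):
--         subset = [all_nums[i] for i in range(n) if (bits >> i) & 1]
--         if is_valid(subset) and len(subset) > len(result):
--             result = subset
--     return result
-- ===== SOURCE B (Python) =====
-- def is_valid(seq):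
--     # a ^ b ^ c == 0 iff c == a ^ b; elements are positive, so a ^ b can never be
--     # a or b itself: a pairwise membership test in the set replaces the triple scan.
--     s = set(seq)
--     for i, a in enumerate(seq):
--         for b in seq[i + 1:]:
--             if a ^ b in s:
--                 return False
--     return True
--
-- def solve(n):
--     result = []
--     for bits in range(1, 1 << n):
--         subset = [i + 1 for i in range(n) if bits >> i & 1]
--         if is_valid(subset) and len(subset) > len(result):
--             result = subset
--     return result
-- ===== Notes on version B (the rewrite author's own statement) =====
-- stated objective: alternative
-- what changed: The O(k^3) scan over all 3-combinations in is_valid is replaced by an O(k^2) pairwise pass testing a ^ b against a set of the subset's elements (valid since a^b^c==0 iff c==a^b and the positive elements force a^b to be a genuine third member), and the subset is built directly as bit indices plus one instead of indexing a prebuilt list.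
import Mathlib
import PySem

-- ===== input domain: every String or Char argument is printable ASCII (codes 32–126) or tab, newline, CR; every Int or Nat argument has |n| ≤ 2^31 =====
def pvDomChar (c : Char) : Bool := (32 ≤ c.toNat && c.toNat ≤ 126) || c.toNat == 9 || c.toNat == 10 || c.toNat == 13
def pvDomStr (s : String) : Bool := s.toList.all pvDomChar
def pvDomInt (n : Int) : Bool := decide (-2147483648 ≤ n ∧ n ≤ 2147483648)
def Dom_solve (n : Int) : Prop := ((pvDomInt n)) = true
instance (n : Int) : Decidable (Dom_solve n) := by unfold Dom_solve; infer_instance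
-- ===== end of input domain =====

-- B replaces A's O(k^3) scan over all 3-combinations by an O(k^2) pairwise pass testing
-- a^b against a set of the subset's elements, and builds each subset directly from bit
-- indices (alternative algorithm; not measured faster).

-- Python's 'bits >> i & 1' truthiness test, used by both sources; i.toNat is exact since
-- i always ranges over 0..n-1 here.
def pyBit (bits i : Int) : Bool := (PySem.Int.band (bits >>> i.toNat) 1) != 0

-- ===== PORT A =====
-- itertools.combinations(l, 2) / (l, 3), in iteration order
def combs2 (l : List Int) : List (Int × Int) :=
  match l with
  | [] => []
  | x :: xs => xs.map (fun b => (x, b)) ++ combs2 xs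

def combs3 (l : List Int) : List (Int × Int × Int) :=
  match l with
  | [] => []
  | x :: xs => (combs2 xs).map (fun p => (x, p.1, p.2)) ++ combs3 xs

def is_valid (seq : List Int) : Bool :=
  (combs3 seq).all (fun t => !(PySem.Int.bxor (PySem.Int.bxor t.1 t.2.1) t.2.2 == 0))

def solve (n : Int) : List Int :=
  -- n.toNat in '1 << n' is exact: Pre_ gives 0 ≤ n (Python raises on n < 0); the index i
  -- into all_nums is always in range, so pyGetD with any default is Python's all_nums[i].
  let all_nums := PySem.List.pyRange 1 (n + 1) 1
  (PySem.List.pyRange 1 (1 <<< n.toNat) 1).foldl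
    (fun result bits =>
      let subset := ((PySem.List.pyRange 0 n 1).filter (fun i => pyBit bits i)).map
          (fun i => PySem.List.pyGetD all_nums i 0)
      if is_valid subset && subset.length > result.length then subset else result) []

-- ===== PORT B =====
-- the pairwise pass of Source B: element a at index i, then b over seq[i+1:]
def pairScan (s : PySem.Set Int) : List Int → Bool
  | [] => true
  | a :: rest =>
      if rest.any (fun b => PySem.Set.contains s (PySem.Int.bxor a b)) then false
      else pairScan s rest

def is_valid_alt (seq : List Int) : Bool :=
  pairScan (PySem.Set.ofList seq) seq

def solve_alt (n : Int) : List Int :=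
  (PySem.List.pyRange 1 (1 <<< n.toNat) 1).foldl
    (fun result bits =>
      let subset := (PySem.List.pyRange 0 n 1).filterMap
          (fun i => if pyBit bits i then some (i + 1) else none)
      if is_valid_alt subset && subset.length > result.length then subset else result) []

-- ===== PRECONDITION & SPEC =====
-- Pre_: Python's '1 << n' raises ValueError for n < 0; A returns on every n ≥ 0.
def Pre_solve (n : Int) : Prop := 0 ≤ n
instance (n : Int) : Decidable (Pre_solve n) := by unfold Pre_solve; infer_instance
def pvWitness_solve : Int := (3)

def Spec_solve (n : Int) (out : List Int) : Prop := out = solve_alt n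
instance (n : Int) (out : List Int) : Decidable (Spec_solve n out) := by unfold Spec_solve; infer_instance

-- ===== CLAIM (what is proved, stated in full; the proofs are below) =====
def Claim_equal_solve : Prop := ∀ (n : Int), Dom_solve n → Pre_solve n → Spec_solve n (solve n)

-- ===== LEMMAS AND PROOFS =====

theorem combs2_cons (x : Int) (xs : List Int) :
    combs2 (x :: xs) = xs.map (fun b => (x, b)) ++ combs2 xs := rfl

theorem combs3_cons (x : Int) (xs : List Int) :
    combs3 (x :: xs) = (combs2 xs).map (fun p => (x, p.1, p.2)) ++ combs3 xs := rfl

-- XOR over nonnegative integers reduces to Nat's xor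
theorem xor3_eq {a b c : Int} (ha : 0 ≤ a) (hb : 0 ≤ b) (hc : 0 ≤ c) :
    PySem.Int.bxor (PySem.Int.bxor a b) c = ((a.toNat ^^^ b.toNat ^^^ c.toNat : Nat) : Int) := by
  rw [PySem.Int.bxor_of_nonneg ha hb, PySem.Int.bxor_of_nonneg (Int.natCast_nonneg _) hc]
  simp [Nat.xor_assoc]

theorem xor3_zero_iff {a b c : Int} (ha : 0 ≤ a) (hb : 0 ≤ b) (hc : 0 ≤ c) :
    PySem.Int.bxor (PySem.Int.bxor a b) c = 0 ↔ c = PySem.Int.bxor a b := by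
  rw [xor3_eq ha hb hc, PySem.Int.bxor_of_nonneg ha hb]
  constructor
  · intro h
    have h' : a.toNat ^^^ b.toNat ^^^ c.toNat = 0 := by exact_mod_cast h
    have := (Nat.xor_eq_zero_iff).1 h'
    omega
  · intro h
    subst h
    simp

theorem xor_ne_left {a b : Int} (ha : 1 ≤ a) (hb : 1 ≤ b) : PySem.Int.bxor a b ≠ a := by
  rw [PySem.Int.bxor_of_nonneg (by omega) (by omega)]
  intro h
  have h' : a.toNat ^^^ b.toNat = a.toNat := by omega
  have h2 : a.toNat ^^^ (a.toNat ^^^ b.toNat) = a.toNat ^^^ a.toNat := by rw [h']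
  rw [← Nat.xor_assoc, Nat.xor_self, Nat.zero_xor] at h2
  omega

theorem xor_ne_right {a b : Int} (ha : 1 ≤ a) (hb : 1 ≤ b) : PySem.Int.bxor a b ≠ b := by
  rw [PySem.Int.bxor_comm]; exact xor_ne_left hb ha

-- membership facts for combs2 / combs3
theorem combs2_mem {l : List Int} {p : Int × Int} (h : p ∈ combs2 l) : p.1 ∈ l ∧ p.2 ∈ l := by
  induction l with
  | nil => simp [combs2] at h
  | cons x xs ih =>
      rw [combs2_cons] at h
      rcases List.mem_append.1 h with h' | h'
      · rcases List.mem_map.1 h' with ⟨b, hb, he⟩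
        subst he
        exact ⟨List.mem_cons_self, List.mem_cons_of_mem _ hb⟩
      · have := ih h'
        exact ⟨List.mem_cons_of_mem _ this.1, List.mem_cons_of_mem _ this.2⟩

theorem combs2_ne {l : List Int} (hnd : l.Nodup) {p : Int × Int} (h : p ∈ combs2 l) :
    p.1 ≠ p.2 := by
  induction l with
  | nil => simp [combs2] at h
  | cons x xs ih =>
      rcases List.nodup_cons.1 hnd with ⟨hx, hxs⟩
      rw [combs2_cons] at h
      rcases List.mem_append.1 h with h' | h'
      · rcases List.mem_map.1 h' with ⟨b, hb, he⟩
        subst he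
        intro he2
        simp only at he2
        subst he2
        exact hx hb
      · exact ih hxs h'

theorem combs3_mem {l : List Int} {t : Int × Int × Int} (h : t ∈ combs3 l) :
    (t.1, t.2.1) ∈ combs2 l ∧ t.2.2 ∈ l := by
  induction l with
  | nil => simp [combs3] at h
  | cons x xs ih =>
      rw [combs3_cons] at h
      rcases List.mem_append.1 h with h' | h'
      · rcases List.mem_map.1 h' with ⟨p, hp, he⟩
        subst he
        refine ⟨?_, List.mem_cons_of_mem _ (combs2_mem hp).2⟩
        rw [combs2_cons]
        exact List.mem_append_left _ (List.mem_map.2 ⟨p.1, (combs2_mem hp).1, rfl⟩)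
      · have := ih h'
        refine ⟨?_, List.mem_cons_of_mem _ this.2⟩
        rw [combs2_cons]
        exact List.mem_append_right _ this.1

theorem pair_mem {l : List Int} {y z : Int} (hy : y ∈ l) (hz : z ∈ l) (hne : y ≠ z) :
    (y, z) ∈ combs2 l ∨ (z, y) ∈ combs2 l := by
  induction l with
  | nil => simp at hy
  | cons x xs ih =>
      by_cases hyx : y = x
      · subst hyx
        have hz' : z ∈ xs := (List.mem_cons.1 hz).resolve_left (Ne.symm hne)
        left
        rw [combs2_cons]
        exact List.mem_append_left _ (List.mem_map.2 ⟨z, hz', rfl⟩)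
      · by_cases hzx : z = x
        · subst hzx
          have hy' : y ∈ xs := (List.mem_cons.1 hy).resolve_left hyx
          right
          rw [combs2_cons]
          exact List.mem_append_left _ (List.mem_map.2 ⟨y, hy', rfl⟩)
        · have hy' : y ∈ xs := (List.mem_cons.1 hy).resolve_left hyx
          have hz' : z ∈ xs := (List.mem_cons.1 hz).resolve_left hzx
          rcases ih hy' hz' with h | h
          · left
            rw [combs2_cons]
            exact List.mem_append_right _ h
          · right
            rw [combs2_cons]
            exact List.mem_append_right _ h

-- any three distinct members of a list of nonnegatives occur, in some order, in combs3,
-- with the same triple xor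
theorem triple_mem {l : List Int} (hnn : ∀ w ∈ l, 0 ≤ w) {x y z : Int}
    (hx : x ∈ l) (hy : y ∈ l) (hz : z ∈ l)
    (hxy : x ≠ y) (hxz : x ≠ z) (hyz : y ≠ z) :
    ∃ t ∈ combs3 l, PySem.Int.bxor (PySem.Int.bxor t.1 t.2.1) t.2.2
      = PySem.Int.bxor (PySem.Int.bxor x y) z := by
  have hx0 := hnn x hx; have hy0 := hnn y hy; have hz0 := hnn z hz
  induction l with
  | nil => simp at hx
  | cons h tl ih =>
      have hnn' : ∀ w ∈ tl, 0 ≤ w := fun w hw => hnn w (List.mem_cons_of_mem _ hw)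
      by_cases hxh : x = h
      · subst hxh
        have hy' : y ∈ tl := (List.mem_cons.1 hy).resolve_left (Ne.symm hxy)
        have hz' : z ∈ tl := (List.mem_cons.1 hz).resolve_left (Ne.symm hxz)
        rcases pair_mem hy' hz' hyz with hp | hp
        · refine ⟨(x, y, z), ?_, rfl⟩
          rw [combs3_cons]
          exact List.mem_append_left _ (List.mem_map.2 ⟨(y, z), hp, rfl⟩)
        · refine ⟨(x, z, y), ?_, ?_⟩
          · rw [combs3_cons]
            exact List.mem_append_left _ (List.mem_map.2 ⟨(z, y), hp, rfl⟩)
          · rw [xor3_eq hx0 hz0 hy0, xor3_eq hx0 hy0 hz0]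
            congr 1
            simp [Nat.xor_assoc, Nat.xor_comm, Nat.xor_left_comm]
      · by_cases hyh : y = h
        · subst hyh
          have hx' : x ∈ tl := (List.mem_cons.1 hx).resolve_left hxh
          have hz' : z ∈ tl := (List.mem_cons.1 hz).resolve_left (Ne.symm hyz)
          rcases pair_mem hx' hz' hxz with hp | hp
          · refine ⟨(y, x, z), ?_, ?_⟩
            · rw [combs3_cons]
              exact List.mem_append_left _ (List.mem_map.2 ⟨(x, z), hp, rfl⟩)
            · rw [xor3_eq hy0 hx0 hz0, xor3_eq hx0 hy0 hz0]
              congr 1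
              simp [Nat.xor_assoc, Nat.xor_comm]
          · refine ⟨(y, z, x), ?_, ?_⟩
            · rw [combs3_cons]
              exact List.mem_append_left _ (List.mem_map.2 ⟨(z, x), hp, rfl⟩)
            · rw [xor3_eq hy0 hz0 hx0, xor3_eq hx0 hy0 hz0]
              congr 1
              simp [Nat.xor_assoc, Nat.xor_comm]
        · by_cases hzh : z = h
          · subst hzh
            have hx' : x ∈ tl := (List.mem_cons.1 hx).resolve_left hxh
            have hy' : y ∈ tl := (List.mem_cons.1 hy).resolve_left hyh
            rcases pair_mem hx' hy' hxy with hp | hp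
            · refine ⟨(z, x, y), ?_, ?_⟩
              · rw [combs3_cons]
                exact List.mem_append_left _ (List.mem_map.2 ⟨(x, y), hp, rfl⟩)
              · rw [xor3_eq hz0 hx0 hy0, xor3_eq hx0 hy0 hz0]
                congr 1
                simp [Nat.xor_assoc, Nat.xor_comm, Nat.xor_left_comm]
            · refine ⟨(z, y, x), ?_, ?_⟩
              · rw [combs3_cons]
                exact List.mem_append_left _ (List.mem_map.2 ⟨(y, x), hp, rfl⟩)
              · rw [xor3_eq hz0 hy0 hx0, xor3_eq hx0 hy0 hz0]
                congr 1
                simp [Nat.xor_assoc, Nat.xor_comm]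
          · have hx' : x ∈ tl := (List.mem_cons.1 hx).resolve_left hxh
            have hy' : y ∈ tl := (List.mem_cons.1 hy).resolve_left hyh
            have hz' : z ∈ tl := (List.mem_cons.1 hz).resolve_left hzh
            rcases ih hnn' hx' hy' hz' with ⟨t, ht, he⟩
            refine ⟨t, ?_, he⟩
            rw [combs3_cons]
            exact List.mem_append_right _ ht

-- characterization of the B-side pairwise pass
theorem pairScan_eq_true {s : PySem.Set Int} {l : List Int} :
    pairScan s l = true ↔ ∀ p ∈ combs2 l, PySem.Set.contains s (PySem.Int.bxor p.1 p.2) = false := by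
  induction l with
  | nil => simp [pairScan, combs2]
  | cons a rest ih =>
      cases hany : rest.any (fun b => PySem.Set.contains s (PySem.Int.bxor a b)) with
      | true =>
          simp only [pairScan, hany, if_true]
          constructor
          · intro h; cases h
          · intro h
            rcases List.any_eq_true.1 hany with ⟨b, hb, hc⟩
            have hm : (a, b) ∈ combs2 (a :: rest) := by
              rw [combs2_cons]
              exact List.mem_append_left _ (List.mem_map.2 ⟨b, hb, rfl⟩)
            have := h (a, b) hm
            simp only at this
            rw [this] at hc; cases hc
      | false =>
          rw [show pairScan s (a :: rest)
              = if rest.any (fun b => PySem.Set.contains s (PySem.Int.bxor a b)) then false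
                else pairScan s rest from rfl, hany, if_neg (by simp), ih]
          constructor
          · intro h p hp
            rw [combs2_cons] at hp
            rcases List.mem_append.1 hp with h' | h'
            · rcases List.mem_map.1 h' with ⟨b, hb, he⟩
              subst he
              simpa using List.any_eq_false.1 hany b hb
            · exact h p h'
          · intro h p hp
            refine h p ?_
            rw [combs2_cons]
            exact List.mem_append_right _ hp

-- the heart: on a duplicate-free list of positive integers the two validity checks agree
theorem is_valid_eq (seq : List Int) (hnd : seq.Nodup) (hpos : ∀ w ∈ seq, 1 ≤ w) :
    is_valid seq = is_valid_alt seq := by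
  have hnn : ∀ w ∈ seq, 0 ≤ w := fun w hw => le_trans (by norm_num) (hpos w hw)
  have hA : is_valid seq = true ↔
      ∀ t ∈ combs3 seq, PySem.Int.bxor (PySem.Int.bxor t.1 t.2.1) t.2.2 ≠ 0 := by
    simp [is_valid, List.all_eq_true]
  have hcont : ∀ x : Int, PySem.Set.contains (PySem.Set.ofList seq) x = true ↔ x ∈ seq := by
    intro x
    simp [PySem.Set.contains]
  have hB : is_valid_alt seq = true ↔
      ∀ p ∈ combs2 seq, PySem.Int.bxor p.1 p.2 ∉ seq := by
    rw [is_valid_alt, pairScan_eq_true]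
    constructor
    · intro h p hp hm
      have h1 := h p hp
      rw [← hcont (PySem.Int.bxor p.1 p.2)] at hm
      rw [h1] at hm; cases hm
    · intro h p hp
      have h1 := h p hp
      rw [← hcont (PySem.Int.bxor p.1 p.2)] at h1
      exact Bool.eq_false_iff.2 h1
  have key : (∀ t ∈ combs3 seq, PySem.Int.bxor (PySem.Int.bxor t.1 t.2.1) t.2.2 ≠ 0) ↔
      (∀ p ∈ combs2 seq, PySem.Int.bxor p.1 p.2 ∉ seq) := by
    constructor
    · intro h p hp hm
      rcases combs2_mem hp with ⟨h1, h2⟩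
      have hne12 : p.1 ≠ p.2 := combs2_ne hnd hp
      have hc1 : PySem.Int.bxor p.1 p.2 ≠ p.1 := xor_ne_left (hpos _ h1) (hpos _ h2)
      have hc2 : PySem.Int.bxor p.1 p.2 ≠ p.2 := xor_ne_right (hpos _ h1) (hpos _ h2)
      rcases triple_mem hnn h1 h2 hm hne12 (Ne.symm hc1) (Ne.symm hc2) with ⟨t, ht, he⟩
      refine h t ht ?_
      rw [he, xor3_zero_iff (hnn _ h1) (hnn _ h2) (hnn _ hm)]
    · intro h t ht hz
      rcases combs3_mem ht with ⟨hp, hm⟩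
      rcases combs2_mem hp with ⟨h1, h2⟩
      have he : t.2.2 = PySem.Int.bxor t.1 t.2.1 :=
        (xor3_zero_iff (hnn _ h1) (hnn _ h2) (hnn _ hm)).1 hz
      exact h _ hp (he ▸ hm)
  rw [Bool.eq_iff_iff, hA, hB]
  exact key

-- the two subset constructions agree for every bits
theorem subset_eq (n bits : Int) :
    ((PySem.List.pyRange 0 n 1).filter (fun i => pyBit bits i)).map
        (fun i => PySem.List.pyGetD (PySem.List.pyRange 1 (n + 1) 1) i 0)
      = (PySem.List.pyRange 0 n 1).filterMap
          (fun i => if pyBit bits i then some (i + 1) else none) := by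
  have hmf : ∀ (p : Int → Bool) (f : Int → Int) (l : List Int),
      List.map f (List.filter p l) = List.filterMap (fun x => if p x then some (f x) else none) l := by
    intro p f l
    induction l with
    | nil => rfl
    | cons h t ih => by_cases hp : p h <;> simp [hp, ih]
  rw [hmf]
  apply List.filterMap_congr
  intro i hi
  rcases PySem.List.mem_pyRange_one.1 hi with ⟨h0, h1⟩
  by_cases hp : pyBit bits i
  · rw [if_pos hp, if_pos hp]
    congr 1
    rw [PySem.List.pyGetD_eq_getElem _ _ h0 (by rw [PySem.List.length_pyRange_one]; omega),
      PySem.List.getElem_pyRange_one]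
    omega
  · rw [if_neg hp, if_neg hp]

-- the built subset is duplicate-free and all its elements are ≥ 1
theorem subset_nodup (n bits : Int) :
    ((PySem.List.pyRange 0 n 1).filterMap
        (fun i => if pyBit bits i then some (i + 1) else none)).Nodup := by
  apply List.Nodup.filterMap
  · intro i j b hi hj
    simp only [Option.mem_def] at hi hj
    split_ifs at hi hj; simp_all; omega
  · exact PySem.List.nodup_pyRange_one 0 n

theorem subset_pos (n bits : Int) :
    ∀ w ∈ (PySem.List.pyRange 0 n 1).filterMap
        (fun i => if pyBit bits i then some (i + 1) else none), 1 ≤ w := by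
  intro w hw
  rcases List.mem_filterMap.1 hw with ⟨i, hi, he⟩
  rcases PySem.List.mem_pyRange_one.1 hi with ⟨h0, _⟩
  split_ifs at he; simp_all; omega

-- ===== VERDICT (by name: the statement is the Claim_ definition above) =====
theorem solve_spec : Claim_equal_solve := by
  intro n _ _
  show solve n = solve_alt n
  show (PySem.List.pyRange 1 (1 <<< n.toNat) 1).foldl
      (fun result bits =>
        let subset := ((PySem.List.pyRange 0 n 1).filter (fun i => pyBit bits i)).map
            (fun i => PySem.List.pyGetD (PySem.List.pyRange 1 (n + 1) 1) i 0)
        if is_valid subset && subset.length > result.length then subset else result) []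
    = (PySem.List.pyRange 1 (1 <<< n.toNat) 1).foldl
      (fun result bits =>
        let subset := (PySem.List.pyRange 0 n 1).filterMap
            (fun i => if pyBit bits i then some (i + 1) else none)
        if is_valid_alt subset && subset.length > result.length then subset else result) []
  refine PySem.List.foldl_congr_mem _ _ _ _ ?_
  intro result bits _
  show (let subset := ((PySem.List.pyRange 0 n 1).filter (fun i => pyBit bits i)).map
          (fun i => PySem.List.pyGetD (PySem.List.pyRange 1 (n + 1) 1) i 0)
        if is_valid subset && subset.length > result.length then subset else result)
    = (let subset := (PySem.List.pyRange 0 n 1).filterMap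
          (fun i => if pyBit bits i then some (i + 1) else none)
        if is_valid_alt subset && subset.length > result.length then subset else result)
  simp only [subset_eq n bits, is_valid_eq _ (subset_nodup n bits) (subset_pos n bits)]
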